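-- pv_equiv track=rewrite | github.com/joseph62/cse480-databases | Project2/project.py | parse_selected_columns
-- ===== SOURCE A (Python) =====
-- def parse_selected_columns(tokens):
--     columns = []
--     for token in tokens:
--         if token == "FROM":
--             break
--         elif token == ",":
--             continue
--         elif token == "*":
--             # Return None for all columns
--             columns = None
--             break
--         else:
--             columns.append(token)
--     return columns
-- ===== SOURCE B (Python) =====
-- def parse_selected_columns(tokens):
--     if "FROM" in tokens:
--         prefix = tokens[:tokens.index("FROM")]
--     else:
--         prefix = tokens
--     if "*" in prefix:
--         return None
--     return [t for t in prefix if t != ","]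
-- ===== Notes on version B (the rewrite author's own statement) =====
-- stated objective: simpler
-- what changed: Replaces the interleaved loop-with-break by a locate step (prefix before the first 'FROM'), a '*' membership test, and a comma-filtering comprehension.
import Mathlib
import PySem

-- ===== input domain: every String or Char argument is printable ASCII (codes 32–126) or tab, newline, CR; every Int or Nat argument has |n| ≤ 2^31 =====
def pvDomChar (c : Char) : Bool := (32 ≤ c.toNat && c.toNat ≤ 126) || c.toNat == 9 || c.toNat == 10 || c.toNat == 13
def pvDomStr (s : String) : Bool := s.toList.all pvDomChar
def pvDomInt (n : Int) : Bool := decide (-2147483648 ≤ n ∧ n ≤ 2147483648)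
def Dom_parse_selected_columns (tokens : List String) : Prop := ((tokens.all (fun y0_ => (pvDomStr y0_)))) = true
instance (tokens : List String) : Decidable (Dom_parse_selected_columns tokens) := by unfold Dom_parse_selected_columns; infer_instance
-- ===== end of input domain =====

-- B replaces A's single loop-with-break by a locate step (prefix before 'FROM'), a '*'
-- membership test and a comma-filtering comprehension; objective: simpler decomposition.

-- ===== PORT A =====
-- A's for-loop with break/continue, state = the accumulated columns list
def pscA_loop (columns : List String) : List String → Option (List String)
  | [] => some columns
  | t :: rest =>
    if t = "FROM" then some columns
    else if t = "," then pscA_loop columns rest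
    else if t = "*" then none
    else pscA_loop (columns ++ [t]) rest

def parse_selected_columns (tokens : List String) : Option (List String) :=
  pscA_loop [] tokens

-- ===== PORT B =====
def parse_selected_columns_alt (tokens : List String) : Option (List String) :=
  let prefx : List String :=
    if "FROM" ∈ tokens then
      match PySem.List.index? tokens "FROM" with
      | some i => PySem.List.slice tokens none (some (i : Int))
      | none => tokens
    else tokens
  if "*" ∈ prefx then none
  else some (prefx.filter (fun t => t ≠ ","))

-- ===== PRECONDITION & SPEC =====
def Spec_parse_selected_columns (tokens : List String) (out : Option (List String)) : Prop := out = parse_selected_columns_alt tokens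
instance (tokens : List String) (out : Option (List String)) : Decidable (Spec_parse_selected_columns tokens out) := by unfold Spec_parse_selected_columns; infer_instance

-- ===== CLAIM (what is proved, stated in full; the proofs are below) =====
def Claim_equal_parse_selected_columns : Prop := ∀ (tokens : List String), Dom_parse_selected_columns tokens → Spec_parse_selected_columns tokens (parse_selected_columns tokens)

-- ===== LEMMAS AND PROOFS =====

-- the canonical form both sides reduce to: prefix via takeWhile
def pscSpec (ts : List String) : Option (List String) :=
  let p := ts.takeWhile (fun t => t ≠ "FROM")
  if "*" ∈ p then none else some (p.filter (fun t => t ≠ ","))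

theorem pv_takeWhile_prefix (pre suf : List String) (h : "FROM" ∉ pre) :
    (pre ++ "FROM" :: suf).takeWhile (fun t => t ≠ "FROM") = pre := by
  induction pre with
  | nil => simp
  | cons x xs ih =>
    simp only [List.mem_cons, not_or] at h
    have hx : ¬ x = "FROM" := fun e => h.1 e.symm
    rw [List.cons_append, List.takeWhile_cons]
    simp [hx]
    simpa using ih h.2

theorem pv_takeWhile_self (ts : List String) (h : "FROM" ∉ ts) :
    ts.takeWhile (fun t => t ≠ "FROM") = ts := by
  induction ts with
  | nil => rfl
  | cons x xs ih =>
    simp only [List.mem_cons, not_or] at h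
    have hx : ¬ x = "FROM" := fun e => h.1 e.symm
    simp [List.takeWhile, hx]
    exact fun y hy e => h.2 (e ▸ hy)

theorem pv_alt_eq_spec (ts : List String) : parse_selected_columns_alt ts = pscSpec ts := by
  unfold parse_selected_columns_alt pscSpec
  by_cases hm : "FROM" ∈ ts
  · have hsome : (PySem.List.index? ts "FROM").isSome := (PySem.List.index?_isSome_iff ts "FROM").mpr hm
    obtain ⟨i, hi⟩ := Option.isSome_iff_exists.mp hsome
    obtain ⟨pre, suf, hts, hlen, hnot⟩ := (PySem.List.index?_eq_some_iff _ "FROM" i).mp hi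
    subst hts
    simp only [hm, if_true, hi]
    rw [PySem.List.slice_to_natCast]
    rw [← hlen, List.take_left, pv_takeWhile_prefix _ _ hnot]
  · simp only [hm, if_false]
    rw [pv_takeWhile_self ts hm]

theorem pv_loop_eq (ts : List String) : ∀ acc : List String,
    pscA_loop acc ts = (pscSpec ts).map (fun l => acc ++ l) := by
  induction ts with
  | nil => intro acc; simp [pscA_loop, pscSpec, List.takeWhile]
  | cons t rest ih =>
    intro acc
    by_cases hF : t = "FROM"
    · subst hF; simp [pscA_loop, pscSpec, List.takeWhile]
    · by_cases hC : t = ","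
      · subst hC
        simp only [pscA_loop, if_neg (by decide : ¬("," : String) = "FROM")]
        rw [ih acc]
        simp [pscSpec, List.takeWhile]
      · by_cases hS : t = "*"
        · subst hS
          simp [pscA_loop, pscSpec, List.takeWhile]
        · simp only [pscA_loop, if_neg hF, if_neg hC, if_neg hS]
          rw [ih (acc ++ [t])]
          simp only [pscSpec, List.takeWhile]
          have hS' : ¬ ("*" : String) = t := fun e => hS e.symm
          by_cases hstar : "*" ∈ rest.takeWhile (fun t : String => !decide (t = "FROM"))
          · simp [hstar, hF, hS']
          · simp [hstar, hF, hS', hC]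

-- ===== VERDICT (by name: the statement is the Claim_ definition above) =====
theorem parse_selected_columns_spec : Claim_equal_parse_selected_columns := by
  intro tokens _
  unfold Spec_parse_selected_columns parse_selected_columns
  rw [pv_loop_eq tokens [], pv_alt_eq_spec]
  cases pscSpec tokens <;> simp
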